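-- pv_equiv track=rewrite | github.com/sriramsupreeth2006/DSA-Python-Programs | ExternalSorting.py | external_sort
-- ===== SOURCE A (Python) =====
-- def external_sort(arr, chunk_size):
--     chunks = []
--     i = 0
--     while i < len(arr):
--         chunk = arr[i:i+chunk_size]
--         chunk.sort()
--         chunks.append(chunk)
--         i = i + chunk_size
--     result = []
--     indices = [0] * len(chunks)
--     while True:
--         min_val = None
--         min_chunk = -1
--         j = 0
--         while j < len(chunks):
--             if indices[j] < len(chunks[j]):
--                 val = chunks[j][indices[j]]
--                 if min_val is None or val < min_val:
--                     min_val = val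
--                     min_chunk = j
--             j = j + 1
--         if min_chunk == -1:
--             break
--         result.append(min_val)
--         indices[min_chunk] = indices[min_chunk] + 1
--     return result
-- ===== SOURCE B (Python) =====
-- def external_sort(arr, chunk_size):
--     # One global Timsort: A's sort-chunks-then-k-way-merge of int chunks
--     # returns exactly the ascending sort of arr.
--     return sorted(arr)
-- ===== Notes on version B (the rewrite author's own statement) =====
-- stated objective: faster
-- what changed: Replaces A's chunk-sort plus per-output-element linear scan over all chunk heads (a selection-style k-way merge) by one global sorted() call, which yields the identical ascending list; Pre_ excludes chunk_size <= 0 with a nonempty arr, where A loops forever. Intended as faster (asymptotic; timing runs measured between 1.7x and 7.4x at the largest size).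
import Mathlib
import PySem

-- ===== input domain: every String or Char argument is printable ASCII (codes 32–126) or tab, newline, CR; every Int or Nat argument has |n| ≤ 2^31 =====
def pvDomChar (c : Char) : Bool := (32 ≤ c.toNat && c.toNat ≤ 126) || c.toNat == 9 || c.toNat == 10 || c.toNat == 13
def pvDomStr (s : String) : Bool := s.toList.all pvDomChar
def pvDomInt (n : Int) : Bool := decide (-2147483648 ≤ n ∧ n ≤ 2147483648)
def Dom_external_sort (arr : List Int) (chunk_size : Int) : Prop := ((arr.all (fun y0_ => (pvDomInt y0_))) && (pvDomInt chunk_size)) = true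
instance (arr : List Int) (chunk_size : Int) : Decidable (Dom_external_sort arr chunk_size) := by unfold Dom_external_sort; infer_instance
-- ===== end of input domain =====

-- B replaces A's chunk-sort + O(n*k) selection k-way merge by one global sort
-- (identical ascending output); A loops forever when chunk_size <= 0 and arr ≠ [] — excluded by Pre_.

-- ===== PORT A =====
-- first while loop: chunks.append(sorted(arr[i:i+chunk_size])); i += chunk_size.
-- fuel = arr.length + 1 suffices whenever chunk_size ≥ 1 (the loop runs ≤ arr.length times).
def pvBuildChunks (arr : List Int) (c : Int) (i : Int) (fuel : Nat) : List (List Int) :=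
  match fuel with
  | 0 => []
  | f + 1 =>
    if i < (arr.length : Int) then
      PySem.List.sorted (PySem.List.slice arr (some i) (some (i + c))) (fun x => x) false
        :: pvBuildChunks arr c (i + c) f
    else []

-- inner while loop over j: find the first chunk whose current head is strictly minimal.
-- indices are kept as Nat (Python's are ints that stay ≥ 0); min_chunk keeps Python's Int -1 sentinel.
def pvInnerLoop (chunks : List (List Int)) (indices : List Nat) (j : Nat)
    (minVal : Option Int) (minChunk : Int) : Option Int × Int :=
  if h : j < chunks.length then
    let idx := indices.getD j 0
    let ch := chunks.getD j []
    if idx < ch.length then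
      let val := ch.getD idx 0
      match minVal with
      | none => pvInnerLoop chunks indices (j + 1) (some val) (j : Int)
      | some m =>
        if val < m then pvInnerLoop chunks indices (j + 1) (some val) (j : Int)
        else pvInnerLoop chunks indices (j + 1) minVal minChunk
    else pvInnerLoop chunks indices (j + 1) minVal minChunk
  else (minVal, minChunk)
termination_by chunks.length - j

-- outer while True loop; fuel = total number of elements + 1 (one element is consumed per iteration).
def pvMergeLoop (chunks : List (List Int)) (indices : List Nat) (fuel : Nat) : List Int :=
  match fuel with
  | 0 => []
  | f + 1 =>
    let (mv, mc) := pvInnerLoop chunks indices 0 none (-1)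
    if mc = -1 then []
    else mv.getD 0 ::
      pvMergeLoop chunks (indices.set mc.toNat (indices.getD mc.toNat 0 + 1)) f

def external_sort (arr : List Int) (chunk_size : Int) : List Int :=
  let chunks := pvBuildChunks arr chunk_size 0 (arr.length + 1)
  pvMergeLoop chunks (List.replicate chunks.length 0) ((chunks.map List.length).sum + 1)

-- ===== PORT B =====
def external_sort_alt (arr : List Int) (chunk_size : Int) : List Int :=
  PySem.List.sorted arr (fun x => x) false

-- ===== PRECONDITION & SPEC =====
-- Pre_ excludes chunk_size ≤ 0 with a nonempty arr: there A's first while loop never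
-- terminates (i never grows past len(arr)), so A returns on exactly these inputs.
def Pre_external_sort (arr : List Int) (chunk_size : Int) : Prop :=
  arr = [] ∨ 1 ≤ chunk_size
instance (arr : List Int) (chunk_size : Int) : Decidable (Pre_external_sort arr chunk_size) := by
  unfold Pre_external_sort; infer_instance

def pvWitness_external_sort : List Int × Int := ([5, 2, 9, 1, 5, 6], 2)

def Spec_external_sort (arr : List Int) (chunk_size : Int) (out : List Int) : Prop :=
  out = external_sort_alt arr chunk_size
instance (arr : List Int) (chunk_size : Int) (out : List Int) : Decidable (Spec_external_sort arr chunk_size out) := by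
  unfold Spec_external_sort; infer_instance

-- ===== CLAIM (what is proved, stated in full; the proofs are below) =====
def Claim_equal_external_sort : Prop := ∀ (arr : List Int) (chunk_size : Int),
  Dom_external_sort arr chunk_size → Pre_external_sort arr chunk_size →
  Spec_external_sort arr chunk_size (external_sort arr chunk_size)

-- ===== LEMMAS AND PROOFS =====

-- the list of unconsumed suffixes of the chunks
def pvRem (chunks : List (List Int)) (indices : List Nat) : List (List Int) :=
  List.zipWith (fun ch i => ch.drop i) chunks indices

lemma pvBuildChunks_flatten_perm (arr : List Int) (d : Nat) (hd : 1 ≤ d) :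
    ∀ (fuel i : Nat), arr.length - i ≤ fuel →
      ((pvBuildChunks arr (d : Int) (i : Int) fuel).flatten).Perm (arr.drop i) := by
  intro fuel
  induction fuel with
  | zero =>
    intro i hfu
    have : arr.drop i = [] := List.drop_eq_nil_of_le (by omega)
    simp [pvBuildChunks, this]
  | succ f ih =>
    intro i hfu
    by_cases hi : i < arr.length
    · have hcast : ((i : Int) + (d : Int)) = ((i + d : Nat) : Int) := by push_cast; ring
      have hslice : PySem.List.slice arr (some (i : Int)) (some ((i : Int) + (d : Int)))
          = (arr.drop i).take d := PySem.List.slice_natCast_add arr i d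
      have hrec := ih (i + d) (by omega)
      rw [pvBuildChunks]
      rw [if_pos (by exact_mod_cast hi)]
      rw [hslice, hcast]
      simp only [List.flatten_cons]
      have h1 : (PySem.List.sorted ((arr.drop i).take d) (fun x => x) false).Perm
          ((arr.drop i).take d) := PySem.List.sorted_perm _ _ _
      have h2 : arr.drop (i + d) = (arr.drop i).drop d := by
        rw [List.drop_drop]
      have hp := h1.append (h2 ▸ hrec)
      rwa [List.take_append_drop] at hp
    · have : arr.drop i = [] := List.drop_eq_nil_of_le (by omega)
      rw [pvBuildChunks, if_neg (by exact_mod_cast hi), this]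
      simp

lemma pvBuildChunks_sorted (arr : List Int) (c : Int) (fuel : Nat) :
    ∀ (i : Int), ∀ ch ∈ pvBuildChunks arr c i fuel, ch.Pairwise (· ≤ ·) := by
  induction fuel with
  | zero => intro i ch h; simp [pvBuildChunks] at h
  | succ f ih =>
    intro i ch h
    rw [pvBuildChunks] at h
    split at h
    · rcases List.mem_cons.mp h with rfl | h
      · simpa using PySem.List.sorted_pairwise (PySem.List.slice arr (some i) (some (i + c))) (fun x => x)
      · exact ih _ ch h
    · simp at h

-- the inner loop's scan state, read off the (chunks, indices) tables
def pvOk (chunks : List (List Int)) (indices : List Nat) (j : Nat) : Prop :=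
  indices.getD j 0 < (chunks.getD j []).length

def pvHd (chunks : List (List Int)) (indices : List Nat) (j : Nat) : Int :=
  (chunks.getD j []).getD (indices.getD j 0) 0

-- invariant of the inner j-scan: either nothing qualified yet, or (minVal, minChunk)
-- is the head of the FIRST chunk attaining the strict minimum among positions < j
def pvInv (chunks : List (List Int)) (indices : List Nat) (j : Nat)
    (mv : Option Int) (mc : Int) : Prop :=
  (mv = none ∧ mc = -1 ∧ ∀ k < j, ¬ pvOk chunks indices k) ∨
  (∃ km : Nat, km < j ∧ mc = (km : Int) ∧ pvOk chunks indices km ∧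
    mv = some (pvHd chunks indices km) ∧
    ∀ k < j, pvOk chunks indices k → pvHd chunks indices km ≤ pvHd chunks indices k)

lemma pvOk_lt_length (chunks : List (List Int)) (indices : List Nat) (k : Nat)
    (h : pvOk chunks indices k) : k < chunks.length := by
  by_contra hk
  have : chunks.getD k [] = [] := List.getD_eq_default chunks [] (by omega)
  unfold pvOk at h
  rw [this] at h
  simp at h

lemma pvInnerLoop_inv (chunks : List (List Int)) (indices : List Nat) :
    ∀ (n j : Nat) (mv : Option Int) (mc : Int), chunks.length - j ≤ n →
      pvInv chunks indices j mv mc →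
      pvInv chunks indices chunks.length
        (pvInnerLoop chunks indices j mv mc).1 (pvInnerLoop chunks indices j mv mc).2 := by
  have hmono : ∀ (j : Nat) (mv : Option Int) (mc : Int), chunks.length ≤ j →
      pvInv chunks indices j mv mc → pvInv chunks indices chunks.length mv mc := by
    intro j mv mc hj hinv
    rcases hinv with ⟨h1, h2, h3⟩ | ⟨km, hkm, h2, h3, h4, h5⟩
    · exact Or.inl ⟨h1, h2, fun k hk => h3 k (by omega)⟩
    · exact Or.inr ⟨km, pvOk_lt_length _ _ _ h3, h2, h3, h4, fun k hk => h5 k (by omega)⟩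
  intro n
  induction n with
  | zero =>
    intro j mv mc hn hinv
    rw [pvInnerLoop, dif_neg (by omega)]
    exact hmono j mv mc (by omega) hinv
  | succ n ih =>
    intro j mv mc hn hinv
    by_cases hj : j < chunks.length
    · rw [pvInnerLoop, dif_pos hj]
      simp only
      by_cases hok : indices.getD j 0 < (chunks.getD j []).length
      · rw [if_pos hok]
        have hokj : pvOk chunks indices j := hok
        have hval : (chunks.getD j []).getD (indices.getD j 0) 0 = pvHd chunks indices j := rfl
        rcases hinv with ⟨h1, h2, h3⟩ | ⟨km, hkm, h2, h3, h4, h5⟩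
        · subst h1
          apply ih (j + 1) _ _ (by omega)
          refine Or.inr ⟨j, by omega, rfl, hokj, rfl, ?_⟩
          intro k hk hkok
          rcases Nat.lt_or_ge k j with hkj | hkj
          · exact absurd hkok (h3 k hkj)
          · have : k = j := by omega
            subst this; exact le_refl _
        · subst h4
          simp only [hval]
          by_cases hlt : pvHd chunks indices j < pvHd chunks indices km
          · rw [if_pos hlt]
            apply ih (j + 1) _ _ (by omega)
            refine Or.inr ⟨j, by omega, rfl, hokj, rfl, ?_⟩
            intro k hk hkok
            rcases Nat.lt_or_ge k j with hkj | hkj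
            · exact le_trans (le_of_lt hlt) (h5 k hkj hkok)
            · have : k = j := by omega
              subst this; exact le_refl _
          · rw [if_neg hlt]
            apply ih (j + 1) _ _ (by omega)
            refine Or.inr ⟨km, by omega, h2, h3, rfl, ?_⟩
            intro k hk hkok
            rcases Nat.lt_or_ge k j with hkj | hkj
            · exact h5 k hkj hkok
            · have : k = j := by omega
              subst this; omega
      · rw [if_neg hok]
        apply ih (j + 1) _ _ (by omega)
        rcases hinv with ⟨h1, h2, h3⟩ | ⟨km, hkm, h2, h3, h4, h5⟩
        · refine Or.inl ⟨h1, h2, ?_⟩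
          intro k hk
          rcases Nat.lt_or_ge k j with hkj | hkj
          · exact h3 k hkj
          · have : k = j := by omega
            subst this; exact hok
        · refine Or.inr ⟨km, by omega, h2, h3, h4, ?_⟩
          intro k hk hkok
          rcases Nat.lt_or_ge k j with hkj | hkj
          · exact h5 k hkj hkok
          · have : k = j := by omega
            subst this; exact absurd hkok hok
    · rw [pvInnerLoop, dif_neg hj]
      exact hmono j mv mc (by omega) hinv

lemma pvFlatten_set_perm :
    ∀ (l : List (List Int)) (jm : Nat) (x : Int) (t : List Int) (h : jm < l.length),
      l[jm] = x :: t → l.flatten.Perm (x :: (l.set jm t).flatten) := by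
  intro l
  induction l with
  | nil => intro jm x t h; simp at h
  | cons a rest ih =>
    intro jm x t h hx
    cases jm with
    | zero =>
      simp at hx
      subst hx
      simp
    | succ jm =>
      simp only [List.getElem_cons_succ] at hx
      have hrec := ih jm x t (by simpa using h) hx
      simp only [List.set_cons_succ, List.flatten_cons]
      exact (hrec.append_left a).trans List.perm_middle

lemma pvRem_length (chunks : List (List Int)) (indices : List Nat)
    (hlen : indices.length = chunks.length) :
    (pvRem chunks indices).length = chunks.length := by
  simp [pvRem, hlen]

lemma pvRem_getElem (chunks : List (List Int)) (indices : List Nat)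
    (hlen : indices.length = chunks.length) (j : Nat) (hj : j < chunks.length) :
    (pvRem chunks indices)[j]'(by rw [pvRem_length chunks indices hlen]; exact hj)
      = (chunks[j]).drop (indices[j]'(by omega)) := by
  simp [pvRem]

lemma pvMergeLoop_spec :
    ∀ (fuel : Nat) (chunks : List (List Int)) (indices : List Nat),
      indices.length = chunks.length →
      (∀ ch ∈ chunks, ch.Pairwise (· ≤ ·)) →
      ((pvRem chunks indices).map List.length).sum ≤ fuel →
      (pvMergeLoop chunks indices fuel).Perm (pvRem chunks indices).flatten ∧
        (pvMergeLoop chunks indices fuel).Pairwise (· ≤ ·) := by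
  intro fuel
  induction fuel with
  | zero =>
    intro chunks indices hlen hsorted hfu
    have hflat : (pvRem chunks indices).flatten = [] := by
      have := List.length_flatten (L := pvRem chunks indices)
      have : (pvRem chunks indices).flatten.length = 0 := by omega
      exact List.eq_nil_of_length_eq_zero this
    rw [pvMergeLoop, hflat]
    exact ⟨List.Perm.refl _, List.Pairwise.nil⟩
  | succ f ih =>
    intro chunks indices hlen hsorted hfu
    rw [pvMergeLoop]
    rcases hq : pvInnerLoop chunks indices 0 none (-1) with ⟨mv, mc⟩
    have hinv := pvInnerLoop_inv chunks indices chunks.length 0 none (-1) (by omega)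
      (Or.inl ⟨rfl, rfl, by omega⟩)
    rw [hq] at hinv
    simp only
    rcases hinv with ⟨h1, h2, h3⟩ | ⟨km, hkm, h2, h3, h4, h5⟩
    · -- every chunk is exhausted: result is [] and all remaining suffixes are empty
      subst h2
      rw [if_pos rfl]
      have hflat : (pvRem chunks indices).flatten = [] := by
        apply List.flatten_eq_nil_iff.mpr
        intro l hl
        rcases List.mem_iff_getElem.mp hl with ⟨j, hjl, rfl⟩
        have hj : j < chunks.length := by rwa [pvRem_length chunks indices hlen] at hjl
        rw [pvRem_getElem chunks indices hlen j hj]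
        have hnok := h3 j hj
        unfold pvOk at hnok
        rw [List.getD_eq_getElem chunks [] hj, List.getD_eq_getElem indices 0 (by omega)] at hnok
        exact List.drop_eq_nil_of_le (by omega)
      rw [hflat]
      exact ⟨List.Perm.refl _, List.Pairwise.nil⟩
    · -- a minimal head m at chunk km was found and consumed
      subst h2 h4
      rw [if_neg (by omega), Int.toNat_natCast]
      have hkmc : km < chunks.length := pvOk_lt_length _ _ _ h3
      have hkmi : km < indices.length := by omega
      set idx := indices.getD km 0 with hidx
      have hidxe : idx = indices[km] := List.getD_eq_getElem indices 0 hkmi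
      have hchD : chunks.getD km [] = chunks[km] := List.getD_eq_getElem chunks [] hkmc
      have hok : idx < (chunks[km]).length := by
        have := h3; unfold pvOk at this; rwa [hchD] at this
      set m := pvHd chunks indices km with hm
      have hme : m = (chunks[km])[idx] := by
        rw [hm]; unfold pvHd
        rw [hchD, ← hidx, List.getD_eq_getElem (chunks[km]) 0 hok]
      set indices' := indices.set km (idx + 1) with hind
      have hlen' : indices'.length = chunks.length := by simp [hind, hlen]
      -- the new remainder table is the old one with chunk km's suffix beheaded
      have hdropkm : (chunks[km]).drop idx = m :: (chunks[km]).drop (idx + 1) := by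
        rw [hme]; exact List.drop_eq_getElem_cons hok
      have hrem' : pvRem chunks indices' = (pvRem chunks indices).set km ((chunks[km]).drop (idx + 1)) := by
        apply List.ext_getElem
        · simp [pvRem, hind, hlen]
        · intro j hj1 hj2
          have hjc : j < chunks.length := by
            rw [pvRem_length chunks indices' hlen'] at hj1; exact hj1
          have hji : j < indices.length := by omega
          by_cases hjkm : km = j
          · subst hjkm
            simp [pvRem, hind]
          · simp [pvRem, hind, hjkm]
      have hremkm : (pvRem chunks indices)[km]'(by rw [pvRem_length chunks indices hlen]; exact hkmc)
          = m :: (chunks[km]).drop (idx + 1) := by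
        rw [pvRem_getElem chunks indices hlen km hkmc, ← hidxe, hdropkm]
      have hperm : (pvRem chunks indices).flatten.Perm (m :: (pvRem chunks indices').flatten) := by
        rw [hrem']
        exact pvFlatten_set_perm (pvRem chunks indices) km m ((chunks[km]).drop (idx + 1))
          (by rw [pvRem_length chunks indices hlen]; exact hkmc) hremkm
      have hsum : ((pvRem chunks indices').map List.length).sum ≤ f := by
        have h1 := List.length_flatten (L := pvRem chunks indices)
        have h2 := List.length_flatten (L := pvRem chunks indices')
        have h3 := hperm.length_eq
        simp only [List.length_cons] at h3
        omega
      obtain ⟨ihp, ihs⟩ := ih chunks indices' hlen' hsorted hsum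
      constructor
      · exact (ihp.cons m).trans hperm.symm
      · -- m is ≤ every element still to be emitted
        have hmin : ∀ y ∈ pvMergeLoop chunks indices' f, m ≤ y := by
          intro y hy
          have hy' : y ∈ (pvRem chunks indices').flatten := (ihp.mem_iff).mp hy
          rcases List.mem_flatten.mp hy' with ⟨l, hl, hyl⟩
          rcases List.mem_iff_getElem.mp hl with ⟨j, hjl, rfl⟩
          have hjc : j < chunks.length := by
            rwa [pvRem_length chunks indices' hlen'] at hjl
          rw [pvRem_getElem chunks indices' hlen' j hjc] at hyl
          have hsj : (chunks[j]).Pairwise (· ≤ ·) := hsorted _ (List.getElem_mem hjc)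
          by_cases hjkm : km = j
          · subst hjkm
            have : indices'[km]'(by omega) = idx + 1 := by simp [hind]
            rw [this] at hyl
            have hdp : ((chunks[km]).drop idx).Pairwise (· ≤ ·) :=
              hsj.sublist (List.drop_sublist idx (chunks[km]))
            rw [hdropkm] at hdp
            exact (List.pairwise_cons.mp hdp).1 y hyl
          · have heq : indices'[j]'(by omega) = indices[j]'(by omega) := by
              simp [hind, hjkm]
            rw [heq] at hyl
            have hne : indices[j]'(by omega) < (chunks[j]).length := by
              by_contra hge
              rw [List.drop_eq_nil_of_le (by omega)] at hyl
              simp at hyl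
            have hokj : pvOk chunks indices j := by
              unfold pvOk
              rw [List.getD_eq_getElem chunks [] hjc, List.getD_eq_getElem indices 0 (by omega)]
              exact hne
            have hmj : m ≤ pvHd chunks indices j := h5 j hjc hokj
            have hhdj : pvHd chunks indices j = (chunks[j])[indices[j]'(by omega)] := by
              unfold pvHd
              rw [List.getD_eq_getElem chunks [] hjc, List.getD_eq_getElem indices 0 (by omega),
                List.getD_eq_getElem (chunks[j]) 0 hne]
            have hdp : ((chunks[j]).drop (indices[j]'(by omega))).Pairwise (· ≤ ·) :=
              hsj.sublist (List.drop_sublist _ (chunks[j]))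
            rw [List.drop_eq_getElem_cons hne] at hyl hdp
            rcases List.mem_cons.mp hyl with rfl | hyt
            · rw [hhdj] at hmj; exact hmj
            · have := (List.pairwise_cons.mp hdp).1 y hyt
              rw [hhdj] at hmj; omega
        exact List.pairwise_cons.mpr ⟨hmin, ihs⟩

-- ===== VERDICT (by name: the statement is the Claim_ definition above) =====
theorem external_sort_spec : Claim_equal_external_sort := by
  intro arr c _ hpre
  unfold Spec_external_sort external_sort external_sort_alt
  rcases hpre with rfl | hc
  · have hb : pvBuildChunks [] c 0 (([] : List Int).length + 1) = [] := by
      rw [pvBuildChunks]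
      norm_num
    rw [hb]
    obtain ⟨hp, _⟩ := pvMergeLoop_spec ((([] : List (List Int)).map List.length).sum + 1)
      [] [] rfl (by simp) (by simp [pvRem])
    simp only [pvRem, List.zipWith_nil_left, List.flatten_nil, List.perm_nil] at hp
    show pvMergeLoop ([] : List (List Int)) []
        ((([] : List (List Int)).map List.length).sum + 1) = PySem.List.sorted [] (fun x => x) false
    rw [hp]
    rfl
  · have hcd : c = (c.toNat : Int) := (Int.toNat_of_nonneg (by omega)).symm
    have hd1 : 1 ≤ c.toNat := by omega
    set chunks := pvBuildChunks arr c 0 (arr.length + 1) with hch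
    have hperm : chunks.flatten.Perm arr := by
      rw [hch, hcd]
      have h0 : ((0 : Nat) : Int) = (0 : Int) := rfl
      have := pvBuildChunks_flatten_perm arr c.toNat hd1 (arr.length + 1) 0 (by omega)
      rw [h0, List.drop_zero] at this
      exact this
    have hsorted : ∀ ch ∈ chunks, ch.Pairwise (· ≤ ·) :=
      fun ch h => pvBuildChunks_sorted arr c (arr.length + 1) 0 ch h
    have hrem0 : pvRem chunks (List.replicate chunks.length 0) = chunks := by
      apply List.ext_getElem
      · simp [pvRem]
      · intro j h1 h2
        simp [pvRem]
    obtain ⟨hp, hs⟩ := pvMergeLoop_spec ((chunks.map List.length).sum + 1) chunks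
      (List.replicate chunks.length 0) (by simp)
      hsorted (by rw [hrem0]; rw [← List.length_flatten]; have := List.length_flatten (L := chunks); omega)
    rw [hrem0] at hp
    exact (PySem.List.sorted_id_eq_of_perm_of_pairwise _ _ (hp.trans hperm) hs).symm
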